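-- pv_equiv track=rewrite | github.com/DanOs29-D/PLP-Assignments | symptoms.py | symptom_checker
-- ===== SOURCE A (Python) =====
-- def symptom_checker(symptom):
--     diseases = {"Poisoning":{"Puking","Tummy pain","headache"},
--                 "Prego":{"Cravings","Puking","Missed"},
--                 "Flu":{"Puking","bored","running"}}
--     for disease in diseases:
--         if symptom in diseases[disease]:
--             return disease
--     return "not available"
-- ===== SOURCE B (Python) =====
-- def symptom_checker(symptom):
--     # Build a reverse symptom->disease index once (first disease wins), then one lookup.
--     diseases = {"Poisoning": {"Puking", "Tummy pain", "headache"},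
--                 "Prego": {"Cravings", "Puking", "Missed"},
--                 "Flu": {"Puking", "bored", "running"}}
--     index = {}
--     for disease, symptoms in diseases.items():
--         for s in symptoms:
--             index.setdefault(s, disease)
--     return index.get(symptom, "not available")
-- ===== Notes on version B (the rewrite author's own statement) =====
-- stated objective: alternative
-- what changed: Replaced the early-return scan over disease sets with a reverse symptom-to-disease index built once via setdefault (first disease wins) followed by a single dictionary lookup.
import Mathlib
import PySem

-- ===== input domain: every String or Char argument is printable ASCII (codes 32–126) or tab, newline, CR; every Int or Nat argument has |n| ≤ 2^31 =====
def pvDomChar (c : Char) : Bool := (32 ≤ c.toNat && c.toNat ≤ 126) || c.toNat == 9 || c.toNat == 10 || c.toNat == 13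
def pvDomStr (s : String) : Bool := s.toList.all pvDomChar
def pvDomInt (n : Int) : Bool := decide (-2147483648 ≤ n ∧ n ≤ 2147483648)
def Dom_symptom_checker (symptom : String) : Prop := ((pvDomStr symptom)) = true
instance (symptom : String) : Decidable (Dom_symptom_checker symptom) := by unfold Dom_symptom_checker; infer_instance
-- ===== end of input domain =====

-- B replaces A's early-return scan over the disease sets by a reverse symptom→disease
-- index built once (first disease wins) followed by a single lookup (objective: alternative).

-- ===== PORT A =====
-- A's dict of diseases: association list in insertion order; each value is a Python set.
def pvDiseases_A : List (String × PySem.Set String) :=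
  [("Poisoning", PySem.Set.ofList ["Puking", "Tummy pain", "headache"]),
   ("Prego",     PySem.Set.ofList ["Cravings", "Puking", "Missed"]),
   ("Flu",       PySem.Set.ofList ["Puking", "bored", "running"])]

-- the for-loop with early return: first disease whose set contains the symptom
def pvScan_A (symptom : String) : List (String × PySem.Set String) → String
  | [] => "not available"
  | (disease, syms) :: rest =>
      if symptom ∈ syms then disease else pvScan_A symptom rest

def symptom_checker (symptom : String) : String :=
  pvScan_A symptom pvDiseases_A

-- ===== PORT B =====
-- index.setdefault(s, disease): keep the existing binding if the key is present
def pvSetdefault_B (idx : PySem.Dict String String) (k v : String) : PySem.Dict String String :=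
  match PySem.Dict.get? idx k with
  | some _ => idx
  | none => PySem.Dict.insert idx k v

-- B's own copy of the disease table (same literal data)
def pvDiseases_B : List (String × PySem.Set String) :=
  [("Poisoning", PySem.Set.ofList ["Puking", "Tummy pain", "headache"]),
   ("Prego",     PySem.Set.ofList ["Cravings", "Puking", "Missed"]),
   ("Flu",       PySem.Set.ofList ["Puking", "bored", "running"])]

-- build the reverse index: for each (disease, symptoms), record each symptom once
def pvIndex_B : PySem.Dict String String :=
  pvDiseases_B.foldl
    (fun idx p => p.2.foldl (fun idx s => pvSetdefault_B idx s p.1) idx)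
    PySem.Dict.empty

def symptom_checker_alt (symptom : String) : String :=
  PySem.Dict.getD pvIndex_B symptom "not available"

-- ===== PRECONDITION & SPEC =====
def Spec_symptom_checker (symptom : String) (out : String) : Prop := out = symptom_checker_alt symptom
instance (symptom : String) (out : String) : Decidable (Spec_symptom_checker symptom out) := by unfold Spec_symptom_checker; infer_instance

-- ===== CLAIM (what is proved, stated in full; the proofs are below) =====
def Claim_equal_symptom_checker : Prop := ∀ (symptom : String), Dom_symptom_checker symptom → Spec_symptom_checker symptom (symptom_checker symptom)

-- ===== LEMMAS AND PROOFS =====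

-- the reverse index evaluates to this literal association list (first disease wins)
theorem pvIndex_B_items :
    pvIndex_B.items = [("Puking", "Poisoning"), ("Tummy pain", "Poisoning"),
      ("headache", "Poisoning"), ("Cravings", "Prego"), ("Missed", "Prego"),
      ("bored", "Flu"), ("running", "Flu")] := by decide

-- ===== VERDICT (by name: the statement is the Claim_ definition above) =====
theorem symptom_checker_spec : Claim_equal_symptom_checker := by
  intro s _
  unfold Spec_symptom_checker
  by_cases h1 : s = "Puking" <;> by_cases h2 : s = "Tummy pain" <;>
  by_cases h3 : s = "headache" <;> by_cases h4 : s = "Cravings" <;>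
  by_cases h5 : s = "Missed" <;> by_cases h6 : s = "bored" <;>
  by_cases h7 : s = "running" <;> try (subst_vars; decide)
  have g1 : ("Puking" == s) = false := beq_eq_false_iff_ne.mpr (fun h => h1 h.symm)
  have g2 : ("Tummy pain" == s) = false := beq_eq_false_iff_ne.mpr (fun h => h2 h.symm)
  have g3 : ("headache" == s) = false := beq_eq_false_iff_ne.mpr (fun h => h3 h.symm)
  have g4 : ("Cravings" == s) = false := beq_eq_false_iff_ne.mpr (fun h => h4 h.symm)
  have g5 : ("Missed" == s) = false := beq_eq_false_iff_ne.mpr (fun h => h5 h.symm)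
  have g6 : ("bored" == s) = false := beq_eq_false_iff_ne.mpr (fun h => h6 h.symm)
  have g7 : ("running" == s) = false := beq_eq_false_iff_ne.mpr (fun h => h7 h.symm)
  simp [symptom_checker, symptom_checker_alt, pvScan_A, pvDiseases_A,
        PySem.Dict.getD, PySem.Dict.get?, pvIndex_B_items, List.find?,
        PySem.Set.ofList, PySem.Set.add, h1, h2, h3, h4, h5, h6, h7,
        g1, g2, g3, g4, g5, g6, g7]
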